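-- pv_equiv track=rewrite | github.com/guillemmerino/calendaritzacions | assignacions.py | build_disposicions
-- ===== SOURCE A (Python) =====
-- def build_disposicions(fase):
--
--     matches_0 = []
--     matches_1 = []
--     matches_2 = []
--     matches_3 = []
--     matches_4 = []
--     matches_5 = []
--     matches_6 = []
--     matches_7 = []
--
--     # Trobem la disposicio de partits casa, fora per cada equip
--     for jornada in fase:
--         for partit in jornada:
--             # Cree la configuració de partits per equip
--             if partit[0] == 1:
--                 matches_0.append("casa")
--             if partit[1] == 1:
--                 matches_0.append("fora")
--             if partit[0] == 2:
--                 matches_1.append("casa")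
--             if partit[1] == 2:
--                 matches_1.append("fora")
--             if partit[0] == 3:
--                 matches_2.append("casa")
--             if partit[1] == 3:
--                 matches_2.append("fora")
--             if partit[0] == 4:
--                 matches_3.append("casa")
--             if partit[1] == 4:
--                 matches_3.append("fora")
--             if partit[0] == 5:
--                 matches_4.append("casa")
--             if partit[1] == 5:
--                 matches_4.append("fora")
--             if partit[0] == 6:
--                 matches_5.append("casa")
--             if partit[1] == 6:
--                 matches_5.append("fora")
--             if partit[0] == 7:
--                 matches_6.append("casa")
--             if partit[1] == 7:
--                 matches_6.append("fora")
--             if partit[0] == 8: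
--                 matches_7.append("casa")
--             if partit[1] == 8:
--                 matches_7.append("fora")
--
--
--     disposicions = [ matches_0, matches_1, matches_2, matches_3, matches_4, matches_5, matches_6, matches_7 ]
--
--
--     return disposicions
-- ===== SOURCE B (Python) =====
-- def build_disposicions(fase):
--     # Stage 1: flatten the schedule into one ordered event stream (team, tag).
--     # Stage 2: each team's sequence is an independent filtered scan of it.
--     events = [(v, tag)
--               for jornada in fase
--               for partit in jornada
--               for v, tag in ((partit[0], "casa"), (partit[1], "fora"))]
--     return [[tag for v, tag in events if v == t] for t in range(1, 9)]
-- ===== Notes on version B (the rewrite author's own statement) =====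
-- stated objective: alternative
-- what changed: Instead of one pass bucketing each match into eight named accumulator lists via 16 equality branches, B first flattens the schedule into a single ordered (team, tag) event stream and then derives each of the 8 team sequences by an independent filtered scan of that stream.
import Mathlib
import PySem

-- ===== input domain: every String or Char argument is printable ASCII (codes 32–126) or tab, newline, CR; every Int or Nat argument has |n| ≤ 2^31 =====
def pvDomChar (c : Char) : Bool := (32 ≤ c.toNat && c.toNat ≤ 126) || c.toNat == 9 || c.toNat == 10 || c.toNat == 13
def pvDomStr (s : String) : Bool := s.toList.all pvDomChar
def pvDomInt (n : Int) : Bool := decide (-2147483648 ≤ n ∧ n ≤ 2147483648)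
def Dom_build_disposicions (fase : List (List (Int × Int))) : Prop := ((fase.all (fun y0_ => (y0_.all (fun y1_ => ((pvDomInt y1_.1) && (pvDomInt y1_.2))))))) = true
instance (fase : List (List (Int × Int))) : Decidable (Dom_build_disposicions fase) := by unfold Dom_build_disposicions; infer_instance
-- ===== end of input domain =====

-- B flattens the schedule into one ordered (team, tag) event stream and derives
-- each of the 8 team sequences by an independent filtered scan (objective: alternative).

-- ===== PORT A =====
-- state: the eight named accumulator lists matches_0 .. matches_7
abbrev StA := List String × List String × List String × List String ×
              List String × List String × List String × List String

-- one partit: A's sequence of 16 independent 'if' appends, in source order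
def stepA (st : StA) (partit : Int × Int) : StA :=
  match st with
  | (m0, m1, m2, m3, m4, m5, m6, m7) =>
    let m0 := if partit.1 = 1 then m0 ++ ["casa"] else m0
    let m0 := if partit.2 = 1 then m0 ++ ["fora"] else m0
    let m1 := if partit.1 = 2 then m1 ++ ["casa"] else m1
    let m1 := if partit.2 = 2 then m1 ++ ["fora"] else m1
    let m2 := if partit.1 = 3 then m2 ++ ["casa"] else m2
    let m2 := if partit.2 = 3 then m2 ++ ["fora"] else m2
    let m3 := if partit.1 = 4 then m3 ++ ["casa"] else m3
    let m3 := if partit.2 = 4 then m3 ++ ["fora"] else m3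
    let m4 := if partit.1 = 5 then m4 ++ ["casa"] else m4
    let m4 := if partit.2 = 5 then m4 ++ ["fora"] else m4
    let m5 := if partit.1 = 6 then m5 ++ ["casa"] else m5
    let m5 := if partit.2 = 6 then m5 ++ ["fora"] else m5
    let m6 := if partit.1 = 7 then m6 ++ ["casa"] else m6
    let m6 := if partit.2 = 7 then m6 ++ ["fora"] else m6
    let m7 := if partit.1 = 8 then m7 ++ ["casa"] else m7
    let m7 := if partit.2 = 8 then m7 ++ ["fora"] else m7
    (m0, m1, m2, m3, m4, m5, m6, m7)

def build_disposicions (fase : List (List (Int × Int))) : List (List String) :=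
  let st : StA := ([], [], [], [], [], [], [], [])
  let st := fase.foldl (fun st jornada => jornada.foldl stepA st) st
  match st with
  | (m0, m1, m2, m3, m4, m5, m6, m7) => [m0, m1, m2, m3, m4, m5, m6, m7]

-- ===== PORT B =====
-- the flattened (team, tag) event stream of Source B
def pvEvents (fase : List (List (Int × Int))) : List (Int × String) :=
  fase.flatMap (fun jornada =>
    jornada.flatMap (fun partit => [(partit.1, "casa"), (partit.2, "fora")]))

-- the inner comprehension: [tag for v, tag in events if v == t]
def pvSel (t : Int) (events : List (Int × String)) : List String :=
  events.filterMap (fun e => if e.1 = t then some e.2 else none)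

def build_disposicions_alt (fase : List (List (Int × Int))) : List (List String) :=
  let events := pvEvents fase
  (PySem.List.pyRange 1 9 1).map (fun t => pvSel t events)

-- ===== PRECONDITION & SPEC =====
def Spec_build_disposicions (fase : List (List (Int × Int))) (out : List (List String)) : Prop := out = build_disposicions_alt fase
instance (fase : List (List (Int × Int))) (out : List (List String)) : Decidable (Spec_build_disposicions fase out) := by unfold Spec_build_disposicions; infer_instance

-- ===== CLAIM (what is proved, stated in full; the proofs are below) =====
def Claim_equal_build_disposicions : Prop := ∀ (fase : List (List (Int × Int))), Dom_build_disposicions fase → Spec_build_disposicions fase (build_disposicions fase)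

-- ===== LEMMAS AND PROOFS =====

theorem pvSel_append (t : Int) (a b : List (Int × String)) :
    pvSel t (a ++ b) = pvSel t a ++ pvSel t b := by
  simp [pvSel]

-- invariant: A's tuple state after processing events is the componentwise
-- concatenation of the start state with the per-team selections
theorem stepA_eq (m0 m1 m2 m3 m4 m5 m6 m7 : List String) (p : Int × Int) :
    stepA (m0, m1, m2, m3, m4, m5, m6, m7) p =
      (m0 ++ pvSel 1 [(p.1, "casa"), (p.2, "fora")],
       m1 ++ pvSel 2 [(p.1, "casa"), (p.2, "fora")],
       m2 ++ pvSel 3 [(p.1, "casa"), (p.2, "fora")],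
       m3 ++ pvSel 4 [(p.1, "casa"), (p.2, "fora")],
       m4 ++ pvSel 5 [(p.1, "casa"), (p.2, "fora")],
       m5 ++ pvSel 6 [(p.1, "casa"), (p.2, "fora")],
       m6 ++ pvSel 7 [(p.1, "casa"), (p.2, "fora")],
       m7 ++ pvSel 8 [(p.1, "casa"), (p.2, "fora")]) := by
  simp only [stepA, pvSel, List.filterMap, Prod.mk.injEq]
  refine ⟨?_, ?_, ?_, ?_, ?_, ?_, ?_, ?_⟩ <;> (split_ifs <;> simp_all)

theorem inner_eq (jornada : List (Int × Int)) (m0 m1 m2 m3 m4 m5 m6 m7 : List String) :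
    jornada.foldl stepA (m0, m1, m2, m3, m4, m5, m6, m7) =
      (m0 ++ pvSel 1 (jornada.flatMap (fun p => [(p.1, "casa"), (p.2, "fora")])),
       m1 ++ pvSel 2 (jornada.flatMap (fun p => [(p.1, "casa"), (p.2, "fora")])),
       m2 ++ pvSel 3 (jornada.flatMap (fun p => [(p.1, "casa"), (p.2, "fora")])),
       m3 ++ pvSel 4 (jornada.flatMap (fun p => [(p.1, "casa"), (p.2, "fora")])),
       m4 ++ pvSel 5 (jornada.flatMap (fun p => [(p.1, "casa"), (p.2, "fora")])),
       m5 ++ pvSel 6 (jornada.flatMap (fun p => [(p.1, "casa"), (p.2, "fora")])),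
       m6 ++ pvSel 7 (jornada.flatMap (fun p => [(p.1, "casa"), (p.2, "fora")])),
       m7 ++ pvSel 8 (jornada.flatMap (fun p => [(p.1, "casa"), (p.2, "fora")]))) := by
  induction jornada generalizing m0 m1 m2 m3 m4 m5 m6 m7 with
  | nil => simp [pvSel]
  | cons p ps ih =>
      simp only [List.foldl_cons, stepA_eq, ih, List.flatMap_cons, pvSel_append,
        List.append_assoc]

theorem outer_eq (fase : List (List (Int × Int))) (m0 m1 m2 m3 m4 m5 m6 m7 : List String) :
    fase.foldl (fun st j => j.foldl stepA st) (m0, m1, m2, m3, m4, m5, m6, m7) =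
      (m0 ++ pvSel 1 (pvEvents fase), m1 ++ pvSel 2 (pvEvents fase),
       m2 ++ pvSel 3 (pvEvents fase), m3 ++ pvSel 4 (pvEvents fase),
       m4 ++ pvSel 5 (pvEvents fase), m5 ++ pvSel 6 (pvEvents fase),
       m6 ++ pvSel 7 (pvEvents fase), m7 ++ pvSel 8 (pvEvents fase)) := by
  induction fase generalizing m0 m1 m2 m3 m4 m5 m6 m7 with
  | nil => simp [pvEvents, pvSel]
  | cons j js ih =>
      simp only [List.foldl_cons, inner_eq, ih, pvEvents, List.flatMap_cons,
        pvSel_append, List.append_assoc]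

theorem pyRange_1_9 : PySem.List.pyRange 1 9 1 = [1, 2, 3, 4, 5, 6, 7, 8] := by decide

-- ===== VERDICT (by name: the statement is the Claim_ definition above) =====
theorem build_disposicions_spec : Claim_equal_build_disposicions := by
  intro fase _
  show build_disposicions fase = build_disposicions_alt fase
  unfold build_disposicions build_disposicions_alt
  simp only [outer_eq, pyRange_1_9, List.map, List.nil_append]
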